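-- pv_equiv track=rewrite | github.com/hym482004-oss/Star-2D-bot | main.py | get_break_sum
-- ===== SOURCE A (Python) =====
-- def get_break_sum(total):
--     total = int(total)
--     nums = []
--     for i in range(100):
--         s = f"{i:02d}"
--         if int(s[0]) + int(s[1]) == total:
--             nums.append(s)
--     return nums
-- ===== SOURCE B (Python) =====
-- def get_break_sum(total):
--     total = int(total)
--     nums = []
--     for a in range(10):
--         b = total - a
--         if 0 <= b <= 9:
--             nums.append(f"{a}{b}")
--     return nums
-- ===== Notes on version B (the rewrite author's own statement) =====
-- stated objective: simpler
-- what changed: B constructs each valid two-digit string directly by iterating the first digit a over the ten digits and checking whether b = total - a is a digit, instead of scanning every two-digit number, formatting each and re-parsing both digits to test their sum.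
import Mathlib
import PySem

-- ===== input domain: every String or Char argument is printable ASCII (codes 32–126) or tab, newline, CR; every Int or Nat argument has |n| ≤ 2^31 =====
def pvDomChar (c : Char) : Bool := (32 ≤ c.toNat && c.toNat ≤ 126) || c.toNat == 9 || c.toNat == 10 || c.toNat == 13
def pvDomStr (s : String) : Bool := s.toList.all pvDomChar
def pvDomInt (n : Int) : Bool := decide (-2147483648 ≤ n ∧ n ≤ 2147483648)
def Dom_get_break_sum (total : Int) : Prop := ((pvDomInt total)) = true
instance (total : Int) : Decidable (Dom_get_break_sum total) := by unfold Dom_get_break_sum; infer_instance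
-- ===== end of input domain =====

-- B directly constructs the two-digit strings (first digit a, second b = total - a)
-- instead of scanning all 100 numbers and re-parsing their digits; objective: simpler/alternative.


-- ===== PORT A =====
-- f"{i:02d}" is ported by hand as str(i).zfill(2): exact for the nonnegative i of range(100).
-- int(s[0]) / int(s[1]) are ported as PySem.Int.ofStr? on the one-character string, with getD 0;
-- on range(100) the index and the parse always succeed, so the defaults are never taken.
def get_break_sum (total : Int) : List String :=
  (PySem.List.pyRange 0 100 1).foldl (fun nums i =>
    let s := PySem.Str.zfill (PySem.Int.toStr i) 2
    let d0 := ((PySem.Str.pyGet? s 0).bind (fun c => PySem.Int.ofStr? (String.ofList [c]))).getD 0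
    let d1 := ((PySem.Str.pyGet? s 1).bind (fun c => PySem.Int.ofStr? (String.ofList [c]))).getD 0
    if d0 + d1 = total then nums ++ [s] else nums) []

-- ===== PORT B =====
-- f"{a}{b}" is ported by hand as str(a) ++ str(b): exact.
def get_break_sum_alt (total : Int) : List String :=
  (PySem.List.pyRange 0 10 1).foldl (fun nums a =>
    let b := total - a
    if 0 ≤ b ∧ b ≤ 9 then nums ++ [PySem.Int.toStr a ++ PySem.Int.toStr b] else nums) []

-- ===== PRECONDITION & SPEC =====
def Spec_get_break_sum (total : Int) (out : List String) : Prop := out = get_break_sum_alt total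
instance (total : Int) (out : List String) : Decidable (Spec_get_break_sum total out) := by unfold Spec_get_break_sum; infer_instance

-- ===== CLAIM (what is proved, stated in full; the proofs are below) =====
def Claim_equal_get_break_sum : Prop := ∀ (total : Int), Dom_get_break_sum total → Spec_get_break_sum total (get_break_sum total)

-- ===== LEMMAS AND PROOFS =====
-- digit sum of i as port A computes it (same expression; used only in proofs)
def pvD (i : Int) : Int :=
  let s := PySem.Str.zfill (PySem.Int.toStr i) 2
  ((PySem.Str.pyGet? s 0).bind (fun c => PySem.Int.ofStr? (String.ofList [c]))).getD 0 +
  ((PySem.Str.pyGet? s 1).bind (fun c => PySem.Int.ofStr? (String.ofList [c]))).getD 0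

lemma foldl_id_of {α β : Type} (f : List α → β → List α) (l : List β) (acc : List α)
    (h : ∀ x ∈ l, ∀ a, f a x = a) : l.foldl f acc = acc := by
  induction l generalizing acc with
  | nil => rfl
  | cons x xs ih => rw [List.foldl_cons, h x (by simp), ih _ (fun y hy a => h y (by simp [hy]) a)]

lemma pvD_bound : ∀ k : Nat, k < 100 → 0 ≤ pvD (k : Int) ∧ pvD (k : Int) ≤ 18 := by decide

lemma A_empty_of_out (total : Int) (h : total < 0 ∨ 18 < total) :
    get_break_sum total = [] := by
  apply foldl_id_of
  intro x hx a
  rw [PySem.List.mem_pyRange_one] at hx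
  obtain ⟨h0, h1⟩ := hx
  have hx' : x = ((x.toNat : Nat) : Int) := by omega
  have hb := pvD_bound x.toNat (by omega)
  rw [hx']
  have hne : pvD ((x.toNat : Nat) : Int) ≠ total := by omega
  exact if_neg hne

lemma B_empty_of_out (total : Int) (h : total < 0 ∨ 18 < total) :
    get_break_sum_alt total = [] := by
  apply foldl_id_of
  intro x hx a
  rw [PySem.List.mem_pyRange_one] at hx
  exact if_neg (by omega)

-- ===== VERDICT (by name: the statement is the Claim_ definition above) =====
theorem get_break_sum_spec : Claim_equal_get_break_sum := by
  intro total _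
  unfold Spec_get_break_sum
  by_cases h : 0 ≤ total ∧ total ≤ 18
  · obtain ⟨h1, h2⟩ := h
    interval_cases total <;> decide
  · rw [A_empty_of_out total (by omega), B_empty_of_out total (by omega)]
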